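-- pv_equiv track=rewrite | github.com/roidaradal/aoc-py | 2015/1520.py | findMinHouse
-- ===== SOURCE A (Python) =====
-- def findMinHouse(goal: int, capacity: int, maxCount: int) -> int:
--     N = goal // capacity
--     house = [0] * N
--     elf = 0
--     for elf in range(1, N):
--         count = 0
--         for h in range(elf, N, elf):
--             house[h] += elf * capacity
--             count += 1
--             if maxCount > 0 and count == maxCount: break
--
--     return min(h for h,total in enumerate(house) if total >= goal)
-- ===== SOURCE B (Python) =====
-- def findMinHouse(goal: int, capacity: int, maxCount: int) -> int:
--     N = goal // capacity
--     for h in range(N):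
--         total = 0
--         for d in range(1, h + 1):
--             if h % d == 0 and (maxCount <= 0 or h // d <= maxCount):
--                 total += d * capacity
--         if total >= goal:
--             return h
--     raise ValueError("min() arg is an empty sequence")
-- ===== Notes on version B (the rewrite author's own statement) =====
-- stated objective: alternative
-- what changed: A sieves over elves (each elf walks its multiples, with a visit cap and break) into a shared house array and then takes min() over a filtered enumerate; B computes each house's total directly by trial division over its divisors d=1..h (applying the visit cap as h//d <= maxCount) and returns the first house reaching the goal.
import Mathlib
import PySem

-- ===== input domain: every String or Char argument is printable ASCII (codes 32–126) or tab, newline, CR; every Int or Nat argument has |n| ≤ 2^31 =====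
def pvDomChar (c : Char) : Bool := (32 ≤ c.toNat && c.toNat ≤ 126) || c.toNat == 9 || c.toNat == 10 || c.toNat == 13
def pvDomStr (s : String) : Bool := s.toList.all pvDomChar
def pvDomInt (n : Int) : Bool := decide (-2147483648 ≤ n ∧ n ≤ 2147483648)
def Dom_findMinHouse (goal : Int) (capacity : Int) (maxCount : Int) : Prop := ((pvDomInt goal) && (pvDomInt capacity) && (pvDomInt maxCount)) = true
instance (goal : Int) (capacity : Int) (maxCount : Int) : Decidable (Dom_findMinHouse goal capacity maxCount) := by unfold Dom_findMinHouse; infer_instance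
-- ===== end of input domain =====

-- B re-implements the elf sieve as a direct per-house divisor sum with a first-hit scan
-- (objective: alternative decomposition, not claimed faster). Return values only; neither side mutates inputs.

-- ===== PORT A =====
-- house[h] += elf * capacity. The Python list 'house' is mutated in place; an Array mirrors that.
-- Every index h this loop produces is non-negative and < len(house), so .toNat/setIfInBounds/getD
-- are exact here (no Python negative-index or IndexError behaviour is reachable).
def pvUpd (capacity elf : Int) (house : Array Int) (h : Int) : Array Int :=
  house.setIfInBounds h.toNat (house.getD h.toNat 0 + elf * capacity)

-- the inner 'for h in range(elf, N, elf)' loop with its count/break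
def pvInnerA (capacity maxCount elf : Int) : List Int → Int → Array Int → Array Int
  | [], _, house => house
  | h :: rest, count, house =>
    let house' := pvUpd capacity elf house h
    if 0 < maxCount ∧ count + 1 = maxCount then house'
    else pvInnerA capacity maxCount elf rest (count + 1) house'

def findMinHouse (goal : Int) (capacity : Int) (maxCount : Int) : Int :=
  let N := PySem.Int.floordiv goal capacity
  let house0 : Array Int := Array.replicate N.toNat 0
  let house := (PySem.List.pyRange 1 N).foldl
    (fun hs elf => pvInnerA capacity maxCount elf (PySem.List.pyRange elf N elf) 0 hs) house0
  -- 'enumerate(house)' written as its zipIdx form — the same pairs in the same order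
  -- (PySem.List.enumerate_eq_zipIdx_map; PySem's structural enumerate overflows the
  -- interpreter stack on large houses)
  match PySem.List.min?
      (((house.toList.zipIdx.map (fun p => ((0 : Int) + (p.2 : Int), p.1))).filter
          (fun p => decide (goal ≤ p.2))).map (fun p => p.1))
      (fun x => x) with
  | some m => m
  | none => 0   -- Python: min() of an empty generator raises ValueError; excluded by Pre_

-- ===== PORT B =====
-- total of house h by trial division over d = 1..h
def pvTotalB (capacity maxCount : Int) (h : Int) : Int :=
  (PySem.List.pyRange 1 (h + 1)).foldl
    (fun total d =>
      if PySem.Int.mod h d = 0 ∧ (maxCount ≤ 0 ∨ PySem.Int.floordiv h d ≤ maxCount)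
      then total + d * capacity else total) 0

-- 'for h in range(N): … return h' with the trailing raise
def pvFirstB (goal capacity maxCount : Int) : List Int → Int
  | [] => 0   -- Python: raise ValueError; excluded by Pre_
  | h :: rest =>
    if goal ≤ pvTotalB capacity maxCount h then h
    else pvFirstB goal capacity maxCount rest

def findMinHouse_alt (goal : Int) (capacity : Int) (maxCount : Int) : Int :=
  pvFirstB goal capacity maxCount (PySem.List.pyRange 0 (PySem.Int.floordiv goal capacity))

-- ===== PRECONDITION & SPEC =====
-- the mathematical total of house h: capacity times the sum of the divisors d of h whose
-- elf makes at most maxCount visits before reaching h (h // d ≤ maxCount when maxCount > 0)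
def refTotal (capacity maxCount : Int) (h : Nat) : Int :=
  (((List.range h).map Nat.succ).map (fun d =>
      if d ∣ h ∧ (maxCount ≤ 0 ∨ ((h / d : Nat) : Int) ≤ maxCount) then (d : Int) * capacity
      else 0)).sum

-- Pre_ excludes exactly the inputs where Python A raises: capacity = 0 (ZeroDivisionError) and
-- the inputs where no house below N = goal//capacity reaches the goal (ValueError from min() of
-- an empty generator); Python B raises the same two exceptions on exactly the same inputs.
-- The disjunction is a fast-to-decide case split on when a reaching house exists: house 0
-- suffices when goal ≤ 0; with maxCount = 1 every house h totals h*capacity, so house N-1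
-- decides; otherwise a reaching house below N always exists once 8 ≤ N (proved in
-- pvPre_exists below), and for N < 8 the divisor-sum check is explicit.
def Pre_findMinHouse (goal : Int) (capacity : Int) (maxCount : Int) : Prop :=
  capacity ≠ 0 ∧ 0 < PySem.Int.floordiv goal capacity ∧
  (goal ≤ 0 ∨
   (0 < capacity ∧ maxCount = 1 ∧
     goal ≤ (PySem.Int.floordiv goal capacity - 1) * capacity) ∨
   (0 < capacity ∧ maxCount ≠ 1 ∧
     (8 ≤ PySem.Int.floordiv goal capacity ∨
      ∃ k < (PySem.Int.floordiv goal capacity).toNat, goal ≤ refTotal capacity maxCount k)))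

instance (goal : Int) (capacity : Int) (maxCount : Int) : Decidable (Pre_findMinHouse goal capacity maxCount) := by
  unfold Pre_findMinHouse; infer_instance

def pvWitness_findMinHouse : Int × Int × Int := (10, 1, 0)

def Spec_findMinHouse (goal : Int) (capacity : Int) (maxCount : Int) (out : Int) : Prop := out = findMinHouse_alt goal capacity maxCount
instance (goal : Int) (capacity : Int) (maxCount : Int) (out : Int) : Decidable (Spec_findMinHouse goal capacity maxCount out) := by unfold Spec_findMinHouse; infer_instance

-- ===== CLAIM (what is proved, stated in full; the proofs are below) =====
def Claim_equal_findMinHouse : Prop := ∀ (goal : Int) (capacity : Int) (maxCount : Int), Dom_findMinHouse goal capacity maxCount → Pre_findMinHouse goal capacity maxCount → Spec_findMinHouse goal capacity maxCount (findMinHouse goal capacity maxCount)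

-- ===== LEMMAS AND PROOFS =====

-- generic: list sum over range as a Finset sum
theorem pvListsumRange (k : Nat) (f : Nat → Int) :
    ((List.range k).map f).sum = ∑ j ∈ Finset.range k, f j := by
  induction k with
  | zero => simp
  | succ k ih => simp [List.range_succ, Finset.sum_range_succ, ih]

-- generic: a conditional accumulating loop is a sum
theorem pvFoldlIfAdd {α : Type} (l : List α) (p : α → Prop) [DecidablePred p]
    (g : α → Int) (a : Int) :
    l.foldl (fun acc x => if p x then acc + g x else acc) a
      = a + (l.map (fun x => if p x then g x else 0)).sum := by
  induction l generalizing a with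
  | nil => simp
  | cons x l ih => by_cases h : p x <;> simp [h, ih, add_assoc]

-- B's inner loop computes refTotal
theorem pvTotalB_eq_refTotal (capacity maxCount : Int) (n : Nat) :
    pvTotalB capacity maxCount (n : Int) = refTotal capacity maxCount n := by
  rw [pvTotalB, refTotal, PySem.List.pyRange_one,
    show ((n : Int) + 1 - 1).toNat = n by omega, List.foldl_map,
    pvFoldlIfAdd _
      (fun k : Nat => PySem.Int.mod (n : Int) (1 + (k : Int)) = 0 ∧
        (maxCount ≤ 0 ∨ PySem.Int.floordiv (n : Int) (1 + (k : Int)) ≤ maxCount))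
      (fun k : Nat => (1 + (k : Int)) * capacity),
    List.map_map, zero_add]
  congr 1
  apply List.map_congr_left
  intro k _
  have e1 : (1 : Int) + (k : Int) = ((k + 1 : Nat) : Int) := by push_cast; ring
  simp only [Function.comp, e1, PySem.Int.mod_natCast, PySem.Int.floordiv_natCast,
    Nat.cast_eq_zero, Nat.succ_eq_add_one]
  have e2 : n % (k + 1) = 0 ↔ (k + 1) ∣ n := by
    exact Nat.dvd_iff_mod_eq_zero.symm
  rw [if_congr (by rw [e2]) rfl rfl]

-- ----- A's sieve -----

theorem pvUpd_size (c e : Int) (house : Array Int) (h : Int) :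
    (pvUpd c e house h).size = house.size := by
  simp [pvUpd]

theorem pvUpd_getD (c e : Int) (house : Array Int) (p : Int) (_hp0 : 0 ≤ p)
    (hplt : p.toNat < house.size) (n : Nat) :
    (pvUpd c e house p).getD n 0
      = if n = p.toNat then house.getD p.toNat 0 + e * c else house.getD n 0 := by
  rw [pvUpd, Array.getD_eq_getD_getElem?, Array.getElem?_setIfInBounds]
  by_cases hnp : n = p.toNat
  · rw [if_pos (by omega), if_pos (by omega), hnp]
    simp [mul_comm e c]
  · rw [if_neg (by omega), if_neg hnp, Array.getD_eq_getD_getElem?]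

theorem pvFoldlUpd_size (c e : Int) (P : List Int) (house : Array Int) :
    (P.foldl (pvUpd c e) house).size = house.size := by
  induction P generalizing house with
  | nil => rfl
  | cons p P ih => simp [List.foldl_cons, ih, pvUpd_size]

theorem pvFoldlUpd_get (c e : Int) (P : List Int) (house : Array Int)
    (hP : ∀ p ∈ P, 0 ≤ p ∧ p < (house.size : Int)) (hnd : P.Nodup)
    (n : Nat) (hn : n < house.size) :
    (P.foldl (pvUpd c e) house).getD n 0
      = house.getD n 0 + (if (n : Int) ∈ P then e * c else 0) := by
  induction P generalizing house with
  | nil => simp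
  | cons p P ih =>
    obtain ⟨hp0, hplt⟩ := hP p (by simp)
    have hplen : p.toNat < house.size := by omega
    have hsz' : (pvUpd c e house p).size = house.size := pvUpd_size ..
    rw [List.foldl_cons,
      ih (pvUpd c e house p) (by intro q hq; rw [hsz']; exact hP q (by simp [hq])) hnd.of_cons (by omega)]
    have hget := pvUpd_getD c e house p hp0 hplen n
    by_cases hmem : (n : Int) = p
    · have hnp : n = p.toNat := by omega
      have hnotP : (n : Int) ∉ P := by rw [hmem]; exact (List.nodup_cons.mp hnd).1
      rw [hget, if_pos hnp, if_neg hnotP, if_pos (by simp [hmem]), hnp]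
      ring
    · have hne : ¬ n = p.toNat := by omega
      rw [hget, if_neg hne]
      simp [List.mem_cons, hmem]

theorem pvInnerA_nobreak (c m e : Int) (hm : m ≤ 0) :
    ∀ (L : List Int) (cnt : Int) (house : Array Int),
      pvInnerA c m e L cnt house = L.foldl (pvUpd c e) house := by
  intro L
  induction L with
  | nil => intro cnt house; rfl
  | cons h L ih =>
    intro cnt house
    simp only [pvInnerA, List.foldl_cons]
    rw [if_neg (by omega), ih]

theorem pvInnerA_take (c m e : Int) (hm : 0 < m) :
    ∀ (L : List Int) (cnt : Int) (house : Array Int), cnt < m →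
      pvInnerA c m e L cnt house = (L.take (m - cnt).toNat).foldl (pvUpd c e) house := by
  intro L
  induction L with
  | nil => intro cnt house _; simp [pvInnerA]
  | cons h L ih =>
    intro cnt house hcnt
    simp only [pvInnerA]
    by_cases hb : cnt + 1 = m
    · rw [if_pos ⟨hm, hb⟩]
      have : (m - cnt).toNat = 1 := by omega
      simp [this]
    · rw [if_neg (by tauto), ih (cnt + 1) _ (by omega)]
      have : (m - cnt).toNat = (m - (cnt + 1)).toNat + 1 := by omega
      simp [this]

-- ----- the arithmetic progression range(e, N, e) -----

theorem pvRangeE_eq (e : Nat) (he : 1 ≤ e) (N : Int) :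
    PySem.List.pyRange (e : Int) N (e : Int)
      = (List.range (if (e : Int) < N then ((N - e + e - 1) / e).toNat else 0)).map
          (fun k : Nat => (e : Int) + e * k) := by
  exact PySem.List.pyRange_of_pos _ _ (by omega)

theorem pvRangeE_lt_iff (e : Nat) (he : 1 ≤ e) (N : Int) (j : Nat) :
    j < (if (e : Int) < N then ((N - e + e - 1) / e).toNat else 0) ↔ (e : Int) + e * j < N := by
  set L := if (e : Int) < N then ((N - e + e - 1) / e).toNat else 0 with hL
  constructor
  · intro hj
    have hmem : ((e : Int) + e * j) ∈ PySem.List.pyRange (e : Int) N (e : Int) := by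
      rw [pvRangeE_eq e he N, ← hL]
      exact List.mem_map.mpr ⟨j, List.mem_range.mpr hj, rfl⟩
    exact ((PySem.List.mem_pyRange_iff_of_pos (by omega) _).mp hmem).2.1
  · intro hlt
    have hmem : ((e : Int) + e * j) ∈ PySem.List.pyRange (e : Int) N (e : Int) := by
      refine (PySem.List.mem_pyRange_iff_of_pos (by omega) _).mpr
        ⟨le_add_of_nonneg_right (by positivity), hlt, ⟨j, by ring⟩⟩
    rw [pvRangeE_eq e he N, ← hL] at hmem
    obtain ⟨j', hj', hej⟩ := List.mem_map.mp hmem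
    have hmul : (e : Int) * j' = e * j := by linarith [hej]
    have : (j' : Int) = j := mul_left_cancel₀ (by omega : (e : Int) ≠ 0) hmul
    have : j' = j := by exact_mod_cast this
    rw [List.mem_range] at hj'
    omega

theorem pvRangeE_nodup (e : Nat) (he : 1 ≤ e) (N : Int) :
    (PySem.List.pyRange (e : Int) N (e : Int)).Nodup := by
  rw [pvRangeE_eq e he N]
  refine List.Nodup.map ?_ (List.nodup_range)
  intro a b hab
  have hmul : (e : Int) * a = e * b := by linarith [hab]
  have : (a : Int) = b := mul_left_cancel₀ (by omega : (e : Int) ≠ 0) hmul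
  exact_mod_cast this

theorem pvRangeE_bounds (e : Nat) (he : 1 ≤ e) (N : Int) (x : Int)
    (hx : x ∈ PySem.List.pyRange (e : Int) N (e : Int)) : 0 ≤ x ∧ x < N := by
  have := (PySem.List.mem_pyRange_iff_of_pos (by omega : (0:Int) < (e:Int)) x).mp hx
  exact ⟨by omega, this.2.1⟩

theorem pvDvdSub (e n : Int) : (e ∣ n - e) ↔ (e ∣ n) :=
  ⟨fun h => by simpa using dvd_add h (dvd_refl e), fun h => dvd_sub h (dvd_refl _)⟩

theorem pvMem_rangeE (e : Nat) (he : 1 ≤ e) (N : Int) (n : Nat) :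
    ((n : Int) ∈ PySem.List.pyRange (e : Int) N (e : Int))
      ↔ e ∣ n ∧ e ≤ n ∧ (n : Int) < N := by
  rw [PySem.List.mem_pyRange_iff_of_pos (by omega : (0:Int) < (e:Int))]
  constructor
  · rintro ⟨hle, hlt, hdvd⟩
    rw [pvDvdSub] at hdvd
    exact ⟨by exact_mod_cast hdvd, by exact_mod_cast hle, hlt⟩
  · rintro ⟨hdvd, hle, hlt⟩
    refine ⟨by exact_mod_cast hle, hlt, ?_⟩
    rw [pvDvdSub]
    exact_mod_cast hdvd

theorem pvMem_take_rangeE (e : Nat) (he : 1 ≤ e) (N : Int) (K : Nat) (n : Nat) :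
    ((n : Int) ∈ (PySem.List.pyRange (e : Int) N (e : Int)).take K)
      ↔ e ∣ n ∧ e ≤ n ∧ (n : Int) < N ∧ n / e ≤ K := by
  rw [pvRangeE_eq e he N, ← List.map_take, List.take_range, List.mem_map]
  set L := if (e : Int) < N then ((N - e + e - 1) / e).toNat else 0 with hL
  constructor
  · rintro ⟨j, hj, hjn⟩
    rw [List.mem_range] at hj
    have hn : n = e * (j + 1) := by
      have : (n : Int) = e * ((j : Int) + 1) := by rw [← hjn]; ring
      exact_mod_cast this
    have hdvd : e ∣ n := ⟨j + 1, hn⟩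
    have hdiv : n / e = j + 1 := by
      rw [hn, Nat.mul_div_cancel_left _ (by omega)]
    refine ⟨hdvd, by nlinarith, ?_, by omega⟩
    have := (pvRangeE_lt_iff e he N j).mp (by omega)
    omega
  · rintro ⟨hdvd, hle, hlt, hK⟩
    have hq1 : 1 ≤ n / e := (Nat.one_le_div_iff (by omega)).mpr hle
    obtain ⟨q, hq⟩ : ∃ q, n / e = q + 1 := ⟨n / e - 1, by omega⟩
    have hn : e * (q + 1) = n := by rw [← hq]; exact Nat.mul_div_cancel' hdvd
    have hnc : ((e : Int)) * ((q : Int) + 1) = n := by exact_mod_cast hn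
    have hfq : (e : Int) + e * q = n := by linarith [hnc]
    refine ⟨q, ?_, hfq⟩
    rw [List.mem_range, lt_min_iff]
    refine ⟨by omega, ?_⟩
    rw [pvRangeE_lt_iff e he N]
    omega

-- contribution of elf e to house n
def pvContrib (c m : Int) (e n : Nat) : Int :=
  if e ∣ n ∧ e ≤ n ∧ (m ≤ 0 ∨ ((n / e : Nat) : Int) ≤ m) then (e : Int) * c else 0

theorem pvStep_get (c m N : Int) (e : Nat) (he : 1 ≤ e) (house : Array Int)
    (hlen : (house.size : Int) = N) (n : Nat) (hn : n < house.size) :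
    (pvInnerA c m (e : Int) (PySem.List.pyRange (e : Int) N (e : Int)) 0 house).getD n 0
      = house.getD n 0 + pvContrib c m e n := by
  have hNlt : (n : Int) < N := by omega
  rw [pvContrib]
  by_cases hm : 0 < m
  · rw [pvInnerA_take c m (e : Int) hm _ 0 house (by omega), sub_zero,
      pvFoldlUpd_get c (e : Int) _ house
        (fun p hp => by
          have := pvRangeE_bounds e he N p (List.mem_of_mem_take hp)
          omega)
        ((List.take_sublist _ _).nodup (pvRangeE_nodup e he N)) n hn]
    have hiff : ((n : Int) ∈ (PySem.List.pyRange (e : Int) N (e : Int)).take m.toNat)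
        ↔ (e ∣ n ∧ e ≤ n ∧ (m ≤ 0 ∨ ((n / e : Nat) : Int) ≤ m)) := by
      rw [pvMem_take_rangeE e he N m.toNat n]
      constructor
      · rintro ⟨h1, h2, h3, h4⟩
        exact ⟨h1, h2, Or.inr (by omega)⟩
      · rintro ⟨h1, h2, h3⟩
        refine ⟨h1, h2, hNlt, ?_⟩
        rcases h3 with h | h <;> omega
    rw [if_congr hiff rfl rfl]
  · rw [pvInnerA_nobreak c m (e : Int) (by omega),
      pvFoldlUpd_get c (e : Int) _ house
        (fun p hp => by
          have := pvRangeE_bounds e he N p hp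
          omega)
        (pvRangeE_nodup e he N) n hn]
    have hiff : ((n : Int) ∈ PySem.List.pyRange (e : Int) N (e : Int))
        ↔ (e ∣ n ∧ e ≤ n ∧ (m ≤ 0 ∨ ((n / e : Nat) : Int) ≤ m)) := by
      rw [pvMem_rangeE e he N n]
      constructor
      · rintro ⟨h1, h2, h3⟩
        exact ⟨h1, h2, Or.inl (by omega)⟩
      · rintro ⟨h1, h2, h3⟩
        exact ⟨h1, h2, hNlt⟩
    rw [if_congr hiff rfl rfl]

theorem pvStep_size (c m N : Int) (e : Nat) (house : Array Int) :
    (pvInnerA c m (e : Int) (PySem.List.pyRange (e : Int) N (e : Int)) 0 house).size = house.size := by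
  by_cases hm : 0 < m
  · rw [pvInnerA_take c m (e : Int) hm _ 0 house (by omega), pvFoldlUpd_size]
  · rw [pvInnerA_nobreak c m (e : Int) (by omega), pvFoldlUpd_size]

theorem pvSieve_get (c m N : Int) (ks : List Nat) (house : Array Int)
    (hlen : (house.size : Int) = N) (n : Nat) (hn : n < house.size) :
    (ks.foldl (fun hs k => pvInnerA c m ((k + 1 : Nat) : Int) (PySem.List.pyRange ((k + 1 : Nat) : Int) N ((k + 1 : Nat) : Int)) 0 hs) house).getD n 0
      = house.getD n 0 + (ks.map (fun k => pvContrib c m (k + 1) n)).sum := by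
  induction ks generalizing house with
  | nil => simp
  | cons k ks ih =>
    have he : 1 ≤ k + 1 := by omega
    have hsl := pvStep_size c m N (k + 1) house
    rw [List.foldl_cons, ih _ (by rw [hsl]; exact hlen) (by omega),
      pvStep_get c m N (k + 1) he house hlen n hn, List.map_cons, List.sum_cons]
    ring

theorem pvSieve_size (c m N : Int) (ks : List Nat) (house : Array Int) :
    (ks.foldl (fun hs k => pvInnerA c m ((k + 1 : Nat) : Int) (PySem.List.pyRange ((k + 1 : Nat) : Int) N ((k + 1 : Nat) : Int)) 0 hs) house).size
      = house.size := by
  induction ks generalizing house with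
  | nil => rfl
  | cons k ks ih => rw [List.foldl_cons, ih, pvStep_size]

-- the sieve total at n equals refTotal, for n < N
theorem pvSieveSum_eq_refTotal (c m N : Int) (n : Nat) (hn : (n : Int) < N) :
    ((List.range (N - 1).toNat).map (fun k => pvContrib c m (k + 1) n)).sum
      = refTotal c m n := by
  rw [refTotal, List.map_map, pvListsumRange, pvListsumRange]
  have hsub : Finset.range n ⊆ Finset.range (N - 1).toNat := by
    intro x hx
    rw [Finset.mem_range] at *
    omega
  have hvan : ∀ x ∈ Finset.range (N - 1).toNat, x ∉ Finset.range n →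
      pvContrib c m (x + 1) n = 0 := by
    intro x _ hx
    rw [Finset.mem_range, not_lt] at hx
    rw [pvContrib, if_neg (fun h => absurd h.2.1 (by omega))]
  calc ∑ k ∈ Finset.range (N - 1).toNat, pvContrib c m (k + 1) n
      = ∑ k ∈ Finset.range n, pvContrib c m (k + 1) n := (Finset.sum_subset hsub hvan).symm
    _ = _ := by
        apply Finset.sum_congr rfl
        intro k hk
        rw [Finset.mem_range] at hk
        simp only [Function.comp_apply, pvContrib]
        apply if_congr _ rfl rfl
        simp only [Nat.succ_eq_add_one]
        constructor
        · rintro ⟨h1, _, h3⟩; exact ⟨h1, h3⟩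
        · rintro ⟨h1, h3⟩; exact ⟨h1, by omega, h3⟩

-- min? of a strictly increasing list is its head
theorem pvMin?_pairwise (l : List Int) (hl : l.Pairwise (· < ·)) (a : Int) (t : List Int)
    (he : l = a :: t) :
    PySem.List.min? l (fun x => x) = some a := by
  cases hmin : PySem.List.min? l (fun x => x) with
  | none =>
    rw [PySem.List.min?_eq_none_iff] at hmin
    rw [he] at hmin; cases hmin
  | some m =>
    have hmem := PySem.List.min?_mem hmin
    have hmin' := PySem.List.min?_isMin hmin
    rw [he] at hmem hl
    rcases List.mem_cons.mp hmem with h | h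
    · rw [h]
    · have h1 : a < m := (List.pairwise_cons.mp hl).1 m h
      have h2 : m ≤ a := hmin' a (by rw [he]; exact List.mem_cons_self ..)
      omega

-- B's scan returns the head of the filtered range
theorem pvFirstB_eq (goal c m : Int) (ks : List Nat)
    (hex : ∃ k ∈ ks, goal ≤ refTotal c m k) :
    pvFirstB goal c m (ks.map (fun k : Nat => (k : Int)))
      = ((ks.filter (fun k => decide (goal ≤ refTotal c m k))).headD 0 : Nat) := by
  induction ks with
  | nil => simp at hex
  | cons k ks ih =>
    simp only [List.map_cons, pvFirstB, List.filter_cons]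
    rw [pvTotalB_eq_refTotal]
    by_cases hq : goal ≤ refTotal c m k
    · rw [if_pos hq]
      simp [hq]
    · rw [if_neg hq]
      simp only [hq, decide_false, Bool.false_eq_true, if_false]
      apply ih
      rcases hex with ⟨k', hk', hq'⟩
      rcases List.mem_cons.mp hk' with h | h
      · exact absurd (h ▸ hq') hq
      · exact ⟨k', h, hq'⟩

-- ----- Pre_ gives a reaching house -----

theorem pvRefTotal_term_nonneg (c m : Int) (hc : 0 < c) (h j : Nat) :
    0 ≤ (fun d => if d ∣ h ∧ (m ≤ 0 ∨ ((h / d : Nat) : Int) ≤ m) then (d : Int) * c else 0)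
        (Nat.succ j) := by
  dsimp only
  split
  · positivity
  · exact le_refl 0

theorem pvRefTotal_ge_term (c m : Int) (hc : 0 < c) (h d : Nat) (hd1 : 1 ≤ d) (hdh : d ≤ h)
    (hdvd : d ∣ h) (hcap : m ≤ 0 ∨ ((h / d : Nat) : Int) ≤ m) :
    (d : Int) * c ≤ refTotal c m h := by
  rw [refTotal, List.map_map, pvListsumRange]
  have hmem : d - 1 ∈ Finset.range h := Finset.mem_range.mpr (by omega)
  have hval : ((fun x => if x ∣ h ∧ (m ≤ 0 ∨ ((h / x : Nat) : Int) ≤ m) then (x : Int) * c else 0) ∘ Nat.succ) (d - 1)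
      = (d : Int) * c := by
    simp only [Function.comp_apply, Nat.succ_eq_add_one, show d - 1 + 1 = d by omega]
    exact if_pos ⟨hdvd, hcap⟩
  calc (d : Int) * c = _ := hval.symm
    _ ≤ _ := Finset.single_le_sum (fun j _ => by
        simpa [Nat.succ_eq_add_one] using pvRefTotal_term_nonneg c m hc h j) hmem

theorem pvRefTotal_ge_pair (c m : Int) (hc : 0 < c) (h d1 d2 : Nat)
    (hne : d1 ≠ d2) (hd1 : 1 ≤ d1) (hd2 : 1 ≤ d2) (hdh1 : d1 ≤ h) (hdh2 : d2 ≤ h)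
    (hdvd1 : d1 ∣ h) (hdvd2 : d2 ∣ h)
    (hcap1 : m ≤ 0 ∨ ((h / d1 : Nat) : Int) ≤ m) (hcap2 : m ≤ 0 ∨ ((h / d2 : Nat) : Int) ≤ m) :
    (d1 : Int) * c + (d2 : Int) * c ≤ refTotal c m h := by
  rw [refTotal, List.map_map, pvListsumRange]
  set F := (fun x => if x ∣ h ∧ (m ≤ 0 ∨ ((h / x : Nat) : Int) ≤ m) then (x : Int) * c else 0) ∘ Nat.succ
    with hF
  have hval : ∀ d : Nat, 1 ≤ d → d ∣ h → (m ≤ 0 ∨ ((h / d : Nat) : Int) ≤ m) →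
      F (d - 1) = (d : Int) * c := by
    intro d hd hdvd hcap
    simp only [hF, Function.comp_apply, Nat.succ_eq_add_one, show d - 1 + 1 = d by omega]
    exact if_pos ⟨hdvd, hcap⟩
  have hsub : ({d1 - 1, d2 - 1} : Finset Nat) ⊆ Finset.range h := by
    intro x hx
    rcases Finset.mem_insert.mp hx with hx | hx
    · rw [hx]; exact Finset.mem_range.mpr (by omega)
    · rw [Finset.mem_singleton.mp hx]; exact Finset.mem_range.mpr (by omega)
  calc (d1 : Int) * c + (d2 : Int) * c
      = ∑ x ∈ ({d1 - 1, d2 - 1} : Finset Nat), F x := by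
        rw [Finset.sum_pair (by omega), hval d1 hd1 hdvd1 hcap1, hval d2 hd2 hdvd2 hcap2]
    _ ≤ _ := Finset.sum_le_sum_of_subset_of_nonneg hsub (fun j _ _ => by
        simpa [hF, Nat.succ_eq_add_one] using pvRefTotal_term_nonneg c m hc h j)

theorem pvPre_exists (goal c m : Int) (hPre : Pre_findMinHouse goal c m) :
    ∃ k < (PySem.Int.floordiv goal c).toNat, goal ≤ refTotal c m k := by
  obtain ⟨hc0, hN0, hbr⟩ := hPre
  set N := PySem.Int.floordiv goal c with hN
  by_cases hg0 : goal ≤ 0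
  · exact ⟨0, by omega, by rw [show refTotal c m 0 = 0 from rfl]; omega⟩
  rcases hbr with hbr | ⟨hc, hm1, hle⟩ | ⟨hc, hm1, hor⟩
  · omega
  · -- maxCount = 1: house N-1 totals (N-1)*capacity
    have hN2 : 2 ≤ N := by nlinarith
    refine ⟨(N - 1).toNat, by omega, ?_⟩
    have hk1 : 1 ≤ (N - 1).toNat := by omega
    have := pvRefTotal_ge_term c m hc (N - 1).toNat (N - 1).toNat hk1 le_rfl dvd_rfl
      (Or.inr (by rw [Nat.div_self (by omega)]; omega))
    have hcast : (((N - 1).toNat : Nat) : Int) = N - 1 := by omega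
    rw [hcast] at this
    omega
  · rcases hor with h8 | hex
    · -- 8 ≤ N: the largest even house below N already reaches the goal
      have hm2 : m ≤ 0 ∨ 2 ≤ m := by omega
      set h : Nat := 2 * ((N.toNat - 1) / 2) with hh
      have hNt : ((N.toNat : Nat) : Int) = N := by omega
      have hfacts : 6 ≤ h ∧ h < N.toNat ∧ h = 2 * (h / 2) ∧ 3 ≤ h / 2 ∧
          N.toNat + 1 ≤ h + h / 2 := by omega
      obtain ⟨h6, hlt, heven, h3, hsum⟩ := hfacts
      have hdvd2 : (h / 2) ∣ h := ⟨2, by omega⟩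
      have hdivval : h / (h / 2) = 2 := Nat.div_eq_of_eq_mul_left (by omega) heven
      have hcap1 : m ≤ 0 ∨ ((h / h : Nat) : Int) ≤ m := by
        rw [Nat.div_self (by omega)]; omega
      have hcap2 : m ≤ 0 ∨ ((h / (h / 2) : Nat) : Int) ≤ m := by
        rw [hdivval]; omega
      have hpair := pvRefTotal_ge_pair c m hc h h (h / 2) (by omega) (by omega) (by omega)
        le_rfl (by omega) dvd_rfl hdvd2 hcap1 hcap2
      have hgoal : goal < (N + 1) * c :=
        (PySem.Int.floordiv_lt_iff_lt_mul hc).mp (by omega)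
      have hmul : (N + 1) * c ≤ ((h : Int) + ((h / 2 : Nat) : Int)) * c := by
        have h3e : (N + 1) ≤ (h : Int) + ((h / 2 : Nat) : Int) := by omega
        exact mul_le_mul_of_nonneg_right h3e (by omega)
      refine ⟨h, by omega, ?_⟩
      calc goal ≤ ((h : Int) + ((h / 2 : Nat) : Int)) * c := by omega
        _ = (h : Int) * c + ((h / 2 : Nat) : Int) * c := by ring
        _ ≤ refTotal c m h := hpair
    · exact hex

-- pyGetD on toList is Array.getD
theorem pvGetD_toList (xs : Array Int) (k : Nat) :
    PySem.List.pyGetD xs.toList (k : Int) 0 = xs.getD k 0 := by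
  rw [PySem.List.pyGetD_natCast, List.getD_eq_getElem?_getD, Array.getElem?_toList,
    Array.getD_eq_getD_getElem?]

-- ===== VERDICT (by name: the statement is the Claim_ definition above) =====
theorem findMinHouse_spec : Claim_equal_findMinHouse := by
  unfold Claim_equal_findMinHouse
  intro goal capacity maxCount hDom hPre
  obtain ⟨k0, hk0N, hk0⟩ := pvPre_exists goal capacity maxCount hPre
  show findMinHouse goal capacity maxCount = findMinHouse_alt goal capacity maxCount
  set N := PySem.Int.floordiv goal capacity with hN
  have hN0 : 0 < N := by omega
  -- B reduces to the head of the filtered range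
  have hB : findMinHouse_alt goal capacity maxCount
      = (((List.range N.toNat).filter
            (fun k => decide (goal ≤ refTotal capacity maxCount k))).headD 0 : Nat) := by
    rw [findMinHouse_alt, ← hN, PySem.List.pyRange_zero,
      pvFirstB_eq goal capacity maxCount _ ⟨k0, List.mem_range.mpr hk0N, hk0⟩]
  -- A's sieve
  have hElves : PySem.List.pyRange 1 N
      = (List.range (N - 1).toNat).map (fun k : Nat => ((k + 1 : Nat) : Int)) := by
    rw [PySem.List.pyRange_one]
    apply List.map_congr_left
    intro k _
    push_cast
    ring
  simp only [findMinHouse, ← hN]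
  rw [hElves, List.foldl_map]
  rw [← PySem.List.enumerate_eq_zipIdx_map]
  set houseF := (List.range (N - 1).toNat).foldl
      (fun hs k => pvInnerA capacity maxCount ((k + 1 : Nat) : Int)
        (PySem.List.pyRange ((k + 1 : Nat) : Int) N ((k + 1 : Nat) : Int)) 0 hs)
      (Array.replicate N.toNat (0 : Int)) with hHF
  have hlenF : houseF.size = N.toNat := by
    rw [hHF, pvSieve_size, Array.size_replicate]
  have hget : ∀ n : Nat, n < N.toNat →
      houseF.getD n 0 = refTotal capacity maxCount n := by
    intro n hn
    rw [hHF, pvSieve_get capacity maxCount N _ _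
        (by rw [Array.size_replicate]; omega) n (by rw [Array.size_replicate]; exact hn),
      pvSieveSum_eq_refTotal capacity maxCount N n (by omega),
      Array.getD_eq_getD_getElem?, Array.getElem?_replicate, if_pos hn]
    simp
  -- the candidate list is the filtered range, cast to Int
  have hcands : ((PySem.List.enumerate houseF.toList).filter (fun p => decide (goal ≤ p.2))).map
        (fun p => p.1)
      = ((List.range N.toNat).filter
            (fun k => decide (goal ≤ refTotal capacity maxCount k))).map (fun k : Nat => (k : Int)) := by
    rw [PySem.List.enumerate_eq_map_pyRange houseF.toList 0, PySem.List.len_eq,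
      Array.length_toList, hlenF,
      show ((N.toNat : Nat) : Int) = N by omega, PySem.List.pyRange_zero, List.map_map,
      List.filter_map, List.map_map]
    rw [List.filter_congr (q := fun k => decide (goal ≤ refTotal capacity maxCount k))
      (fun k hk => by
        simp only [Function.comp_apply, pvGetD_toList, hget k (List.mem_range.mp hk)])]
    simp [Function.comp]
  have hmem0 : k0 ∈ (List.range N.toNat).filter
      (fun k => decide (goal ≤ refTotal capacity maxCount k)) :=
    List.mem_filter.mpr ⟨List.mem_range.mpr hk0N, decide_eq_true hk0⟩
  obtain ⟨f0, rest, hcons⟩ := List.exists_cons_of_ne_nil (List.ne_nil_of_mem hmem0)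
  have hpw : (((List.range N.toNat).filter
        (fun k => decide (goal ≤ refTotal capacity maxCount k))).map (fun k : Nat => (k : Int))).Pairwise (· < ·) := by
    apply List.pairwise_map.mpr
    exact (List.pairwise_lt_range.filter _).imp (fun h => by exact_mod_cast h)
  have hmin := pvMin?_pairwise _ (hcands ▸ hpw) ((f0 : Nat) : Int) (rest.map (fun k : Nat => (k : Int)))
    (by rw [hcands, hcons, List.map_cons])
  rw [hmin, hB, hcons]
  rfl
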